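-- pv_equiv track=rewrite | github.com/Bens-Jammin/SudokuSolver | sudoku.py | verify_rows
-- ===== SOURCE A (Python) =====
-- def verify_rows( board: list[list[int]] ) -> bool:
--
--     valid_numbers = {1,2,3,4,5,6,7,8,9}
--     seen_numbers = set()
--
--     for rows in board:
--         for num in rows:
--             if ( num in valid_numbers ) and (num not in seen_numbers):
--                 seen_numbers.add(num)
--             else:
--                 return False
--
--         seen_numbers.clear()
--
--     return True
-- ===== SOURCE B (Python) =====
-- def verify_rows(board: list[list[int]]) -> bool:
--     for row in board:
--         if any(n < 1 or 9 < n for n in row):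
--             return False
--         s = sorted(row)
--         if any(a == b for a, b in zip(s, s[1:])):
--             return False
--     return True
-- ===== Notes on version B (the rewrite author's own statement) =====
-- stated objective: alternative
-- what changed: Replaced A's incremental seen-set with early exit per element by a sort-then-scan per row: a range check on the raw row, then sort the row and detect duplicates by comparing adjacent elements of the sorted copy.
import Mathlib
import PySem

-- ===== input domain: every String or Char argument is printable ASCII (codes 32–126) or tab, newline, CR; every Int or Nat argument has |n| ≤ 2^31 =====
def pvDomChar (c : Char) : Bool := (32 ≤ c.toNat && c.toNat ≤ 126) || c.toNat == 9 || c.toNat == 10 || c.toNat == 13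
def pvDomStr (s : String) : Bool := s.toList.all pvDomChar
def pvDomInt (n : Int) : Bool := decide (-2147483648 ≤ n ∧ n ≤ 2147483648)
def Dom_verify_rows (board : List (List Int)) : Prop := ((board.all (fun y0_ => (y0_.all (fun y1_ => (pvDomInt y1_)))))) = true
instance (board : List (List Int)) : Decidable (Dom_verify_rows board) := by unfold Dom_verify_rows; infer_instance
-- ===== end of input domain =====

-- B replaces A's incremental seen-set with a sort-then-scan per row: range-check the raw
-- row, then sort it and detect duplicates by comparing adjacent elements (objective: alternative).


-- ===== PORT A =====
-- valid_numbers = {1,...,9}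
def validNumbersA : PySem.Set Int := PySem.Set.ofList [1,2,3,4,5,6,7,8,9]

-- inner 'for num in rows' loop; none = the early 'return False'
def innerA (seen : PySem.Set Int) : List Int → Option (PySem.Set Int)
  | [] => some seen
  | num :: rest =>
      if (PySem.Set.contains validNumbersA num) && !(PySem.Set.contains seen num) then
        innerA (PySem.Set.add seen num) rest
      else
        none

-- outer 'for rows in board' loop, with seen_numbers.clear() after each row
def outerA (seen : PySem.Set Int) : List (List Int) → Bool
  | [] => true
  | r :: rs =>
      match innerA seen r with
      | none => false
      | some _ => outerA PySem.Set.empty rs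

def verify_rows (board : List (List Int)) : Bool := outerA PySem.Set.empty board

-- ===== PORT B =====
-- any(n < 1 or 9 < n for n in row)
def rowHasBad (row : List Int) : Bool := row.any (fun n => decide (n < 1) || decide (9 < n))

-- any(a == b for a, b in zip(s, s[1:]))
def rowHasAdjDup (s : List Int) : Bool :=
  (s.zip (PySem.List.slice s (some 1) none)).any (fun p => p.1 == p.2)

-- the 'for row in board' loop with its two early returns
def verify_rows_alt : List (List Int) → Bool
  | [] => true
  | row :: rest =>
      if rowHasBad row then false
      else if rowHasAdjDup (PySem.List.sorted row (fun x => x) false) then false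
      else verify_rows_alt rest

-- ===== PRECONDITION & SPEC =====
def Spec_verify_rows (board : List (List Int)) (out : Bool) : Prop := out = verify_rows_alt board
instance (board : List (List Int)) (out : Bool) : Decidable (Spec_verify_rows board out) := by unfold Spec_verify_rows; infer_instance

-- ===== CLAIM =====
def Claim_equal_verify_rows : Prop := ∀ (board : List (List Int)), Dom_verify_rows board → Spec_verify_rows board (verify_rows board)

-- ===== LEMMAS AND PROOFS =====

lemma innerA_isSome (row : List Int) (seen : PySem.Set Int) :
    (innerA seen row).isSome = true ↔
      (∀ n ∈ row, n ∈ validNumbersA ∧ n ∉ seen) ∧ row.Nodup := by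
  induction row generalizing seen with
  | nil => simp [innerA]
  | cons num rest ih =>
      simp only [innerA]
      by_cases h : (PySem.Set.contains validNumbersA num && !(PySem.Set.contains seen num)) = true
      · rw [if_pos h, ih]
        simp only [Bool.and_eq_true, Bool.not_eq_true', PySem.Set.contains_iff] at h
        rw [← PySem.Set.contains_iff] at h
        have hv : num ∈ validNumbersA := PySem.Set.contains_iff _ _ |>.mp h.1
        have hs : num ∉ seen := by
          intro hc
          rw [(PySem.Set.contains_iff seen num).mpr hc] at h
          exact absurd h.2 (by simp)
        constructor
        · rintro ⟨hall, hnd⟩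
          refine ⟨?_, ?_⟩
          · intro n hn
            rw [List.mem_cons] at hn
            rcases hn with hn | hn
            · exact hn ▸ ⟨hv, hs⟩
            · rcases hall n hn with ⟨hv', hns⟩
              refine ⟨hv', fun hc => hns (by rw [PySem.Set.mem_add]; exact Or.inl hc)⟩
          · refine List.nodup_cons.mpr ⟨?_, hnd⟩
            intro hmem
            rcases hall num hmem with ⟨_, hns⟩
            exact hns (by rw [PySem.Set.mem_add]; exact Or.inr rfl)
        · rintro ⟨hall, hnd⟩
          rcases List.nodup_cons.mp hnd with ⟨hnmem, hnd'⟩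
          refine ⟨?_, hnd'⟩
          intro n hn
          rcases hall n (List.mem_cons_of_mem _ hn) with ⟨hv', hns⟩
          refine ⟨hv', ?_⟩
          rw [PySem.Set.mem_add]
          rintro (hc | hc)
          · exact hns hc
          · exact hnmem (hc ▸ hn)
      · rw [if_neg h]
        simp only [Option.isSome_none, Bool.false_eq_true, false_iff]
        rintro ⟨hall, _⟩
        rcases hall num (List.mem_cons_self) with ⟨hv, hns⟩
        exact h (by
          simp only [Bool.and_eq_true, Bool.not_eq_true']
          exact ⟨(PySem.Set.contains_iff _ _).mpr hv, by
            rcases hc : PySem.Set.contains seen num with _ | _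
            · rfl
            · exact absurd ((PySem.Set.contains_iff _ _).mp hc) hns⟩)

lemma bad_false (row : List Int) :
    rowHasBad row = false ↔ ∀ n ∈ row, n ∈ validNumbersA := by
  simp only [rowHasBad, List.any_eq_false, Bool.or_eq_true, decide_eq_true_eq, not_or, not_lt]
  refine forall₂_congr (fun n _ => ?_)
  simp only [validNumbersA, PySem.Set.mem_ofList, List.mem_cons, List.not_mem_nil, or_false]
  omega

lemma adjDup_false (s : List Int) (hs : s.Pairwise (· ≤ ·)) :
    rowHasAdjDup s = false ↔ s.Pairwise (· < ·) := by
  induction s with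
  | nil => simp [rowHasAdjDup]
  | cons a t ih =>
      cases t with
      | nil => simp [rowHasAdjDup, PySem.List.slice_from_one]
      | cons b u =>
          rw [List.pairwise_cons] at hs
          obtain ⟨hax, hpt⟩ := hs
          have hab : a ≤ b := hax b List.mem_cons_self
          have hbu : ∀ x ∈ u, b ≤ x := (List.pairwise_cons.mp hpt).1
          have ht := ih hpt
          simp only [rowHasAdjDup, PySem.List.slice_from_one, List.tail_cons,
            List.zip_cons_cons, List.any_cons, Bool.or_eq_false_iff,
            beq_eq_false_iff_ne, ne_eq] at ht ⊢
          rw [ht]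
          constructor
          · rintro ⟨hne, hrest⟩
            refine List.pairwise_cons.mpr ⟨fun x hx => ?_, hrest⟩
            rcases List.mem_cons.mp hx with rfl | hx
            · exact lt_of_le_of_ne hab hne
            · exact lt_of_lt_of_le (lt_of_le_of_ne hab hne) (hbu x hx)
          · intro hp
            obtain ⟨hlt, hrest⟩ := List.pairwise_cons.mp hp
            exact ⟨ne_of_lt (hlt b List.mem_cons_self), hrest⟩

lemma pairwise_lt_iff_nodup (s : List Int) (hs : s.Pairwise (· ≤ ·)) :
    s.Pairwise (· < ·) ↔ s.Nodup := by
  constructor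
  · exact fun h => h.imp (fun hab => ne_of_lt hab)
  · intro h
    exact (hs.and h).imp (fun ⟨hle, hne⟩ => lt_of_le_of_ne hle hne)

lemma rowB_iff (row : List Int) :
    (rowHasBad row = false ∧
       rowHasAdjDup (PySem.List.sorted row (fun x => x) false) = false)
      ↔ (∀ n ∈ row, n ∈ validNumbersA) ∧ row.Nodup := by
  have hp : (PySem.List.sorted row (fun x => x) false).Pairwise (· ≤ ·) :=
    PySem.List.sorted_pairwise row (fun x => x)
  have hperm : (PySem.List.sorted row (fun x => x) false).Perm row :=
    PySem.List.sorted_perm row (fun x => x) false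
  rw [bad_false, adjDup_false _ hp, pairwise_lt_iff_nodup _ hp, hperm.nodup_iff]

lemma row_iff (r : List Int) :
    (innerA PySem.Set.empty r).isSome = true ↔
      (rowHasBad r = false ∧
        rowHasAdjDup (PySem.List.sorted r (fun x => x) false) = false) := by
  rw [innerA_isSome, rowB_iff]
  simp [PySem.Set.empty]

lemma outerA_eq (board : List (List Int)) :
    outerA PySem.Set.empty board = verify_rows_alt board := by
  induction board with
  | nil => rfl
  | cons r rs ih =>
      simp only [outerA, verify_rows_alt]
      cases h : innerA PySem.Set.empty r with
      | none =>
          have hnot : ¬(rowHasBad r = false ∧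
              rowHasAdjDup (PySem.List.sorted r (fun x => x) false) = false) := by
            rw [← row_iff, h]; simp
          by_cases hb : rowHasBad r = true
          · simp [hb]
          · have hd : rowHasAdjDup (PySem.List.sorted r (fun x => x) false) = true := by
              rcases hc : rowHasAdjDup (PySem.List.sorted r (fun x => x) false) with _ | _
              · exact absurd ⟨Bool.not_eq_true _ |>.mp hb, hc⟩ hnot
              · rfl
            simp [Bool.not_eq_true _ |>.mp hb, hd]
      | some s =>
          have hok := (row_iff r).mp (by rw [h]; rfl)
          simp [hok.1, hok.2]
          exact ih

-- ===== VERDICT =====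
theorem verify_rows_spec : Claim_equal_verify_rows := by
  intro board _
  unfold Spec_verify_rows verify_rows
  exact outerA_eq board
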